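/- GENERATED by tools/from_farm_form.py from prooffarm-gif/accepted/DGifGetImageHeader.2/Proof.lean (a worked proof of the farm's unit `DGifGetImageHeader.2`,
   accepted by the verdict) — do not edit. -/
import Gif.Spec.Units.DGifGetImageHeader_2
import Gif.Spec.AllSegs
import Gif.Spec.Proved.DGifGetImageHeader_2_Lemmas

open X86 X86.User Asan ProgX.Base ProgX.Base.Spec Gif.Spec

/-!
  `DGifGetImageHeader.2` (0x108ecd … 0x108ef8, the error exit 0x108ea5 … 0x108ead, the short read 0x108f8b … 0x108fcb;
  dgif_lib.c:375-382): A BODY SEGMENT OF A PROTECTED FUNCTION WITH THREE CALLS. The return addresses of the first two calls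
  (`ret7`, `ret8`) are made cuts of the unit's own, with the design's assertion `Mid` there; the three walks are in Lemmas.lean and
  are chained here. The ghosts of `GifFreeMapObject` (`colors`, `n`) are chosen from the forest's `icm` before the last walk.
-/

namespace Gif.Spec.DGifGetImageHeader_2

/-- The `Colors` address handed to `GifFreeMapObject.spec` as a ghost: the map's, if the forest has a local map. -/
def ih2_colors : Option Map → Nat
  | none => 0
  | some m => m.colors

/-- The size of the colour array handed to `GifFreeMapObject.spec` as a ghost: `3 · count`, if the forest has a local map. -/
def ih2_size : Option Map → Nat
  | none => 0
  | some m => 3 * m.count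

end Gif.Spec.DGifGetImageHeader_2

/-- Segment 2 of `DGifGetImageHeader` takes `Mid` at 0x108ecd to `Mid` at 0x108ef8 or to `Done` at 0x108e78. -/
theorem Gif.Spec.Proved.DGifGetImageHeader_2_ok : Gif.Spec.DGifGetImageHeader_2.Statement := by
  intro Lay hLay μ hμ u₀ hcode h_DGifGetWord h_InternalRead h_GifFreeMapObject h_asan_store4_noabort h_asan_load8_noabort
    h_asan_store8_noabort H rest frames F R e ret v hat
  -- the callees' contracts for the frame list of the body (the own frame in front)
  have hgw := h_DGifGetWord H rest (DGifGetImageHeader.framesIn frames e) F R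
  have hir := h_InternalRead H rest (DGifGetImageHeader.framesIn frames e) F R 1
  have hfm := h_GifFreeMapObject H rest (DGifGetImageHeader.framesIn frames e)
    (Gif.Spec.DGifGetImageHeader_2.ih2_colors F.icm) (Gif.Spec.DGifGetImageHeader_2.ih2_size F.icm)
  have hgh : ∀ m, F.icm = some m →
      Gif.Spec.DGifGetImageHeader_2.ih2_colors F.icm = m.colors ∧ Gif.Spec.DGifGetImageHeader_2.ih2_size F.icm = 3 * m.count := by
    intro m hm
    rw [hm]
    exact ⟨rfl, rfl⟩
  -- 0x108ecd … the call of DGifGetWord … 0x108ed9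
  refine (Gif.Spec.DGifGetImageHeader_2.ih2_seg_word Lay hLay μ hμ u₀ hcode H rest frames F R e ret hgw v hat).trans ?_
  intro v1 hv1
  -- 0x108ed9 … 0x108e78 (a word failed) | the call of InternalRead … 0x108eef
  refine (Gif.Spec.DGifGetImageHeader_2.ih2_seg_read Lay hLay μ hμ u₀ hcode H rest frames F R e ret hir v1 hv1).trans ?_
  intro v2 hv2
  rcases hv2 with hmid | hdone
  · -- 0x108eef … 0x108ef8 (one byte) | the short read … 0x108e78
    exact Gif.Spec.DGifGetImageHeader_2.ih2_seg_free Lay hLay μ hμ u₀ hcode H rest frames F R e ret _ _ hgh hfm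
      h_asan_store4_noabort h_asan_load8_noabort h_asan_store8_noabort v2 hmid
  · -- a word failed: `Done` for the entry's heap and forest
    exact ReachVia.done (Or.inr ⟨H, F, hdone⟩)
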